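-- pv_equiv track=rewrite | github.com/trwinowiecki/CSE233-Python | Chapter 7/Script-Exercise 11.py | check_nums
-- ===== SOURCE A (Python) =====
-- def check_nums(t):
--     nums = list(range(1, 10))
--     try:
--         for i in t:
--             for j in i:
--                 nums.remove(j)
--     except ValueError:
--         return False
--
--     if len(nums) == 0:
--         return True
--     else:
--         return False
-- ===== SOURCE B (Python) =====
-- def check_nums(t):
--     flat = [j for i in t for j in i]
--     return sorted(flat) == list(range(1, 10))
-- ===== Notes on version B (the rewrite author's own statement) =====
-- stated objective: simpler
-- what changed: Replaces the mutable shrinking pool with list.remove and try/except early exit by a one-shot flatten plus a single sorted-list comparison against list(range(1,10)).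
import Mathlib
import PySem

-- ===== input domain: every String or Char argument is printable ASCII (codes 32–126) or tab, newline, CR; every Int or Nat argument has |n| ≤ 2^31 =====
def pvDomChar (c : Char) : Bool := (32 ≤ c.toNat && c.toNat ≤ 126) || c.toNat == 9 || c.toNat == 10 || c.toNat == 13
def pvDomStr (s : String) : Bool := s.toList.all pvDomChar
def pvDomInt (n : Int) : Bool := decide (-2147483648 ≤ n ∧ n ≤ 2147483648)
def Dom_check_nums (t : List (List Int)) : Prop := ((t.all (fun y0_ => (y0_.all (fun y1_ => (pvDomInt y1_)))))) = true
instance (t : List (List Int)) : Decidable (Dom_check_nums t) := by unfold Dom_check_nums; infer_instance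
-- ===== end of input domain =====

-- B replaces A's mutable shrinking pool (list.remove with try/except early exit) by a
-- one-shot flatten and a single sorted-list comparison against list(range(1,10)); objective: simpler.


-- ===== PORT A =====
-- inner loop: 'for j in i: nums.remove(j)'; none = the ValueError path
def pvRemoveAll (nums : List Int) : List Int → Option (List Int)
  | [] => some nums
  | j :: js =>
    match PySem.List.remove? nums j with
    | none => none
    | some r => pvRemoveAll r js

-- outer loop: 'for i in t'
def pvLoopA (nums : List Int) : List (List Int) → Option (List Int)
  | [] => some nums
  | i :: t =>
    match pvRemoveAll nums i with
    | none => none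
    | some r => pvLoopA r t

def check_nums (t : List (List Int)) : Bool :=
  match pvLoopA (PySem.List.pyRange 1 10 1) t with
  | none => false                                  -- except ValueError: return False
  | some nums => decide (nums.length = 0)          -- len(nums) == 0

-- ===== PORT B =====
def check_nums_alt (t : List (List Int)) : Bool :=
  decide (PySem.List.sorted (t.flatMap (fun i => i)) (fun x => x) false
            = PySem.List.pyRange 1 10 1)

-- ===== PRECONDITION & SPEC =====
def Spec_check_nums (t : List (List Int)) (out : Bool) : Prop := out = check_nums_alt t
instance (t : List (List Int)) (out : Bool) : Decidable (Spec_check_nums t out) := by unfold Spec_check_nums; infer_instance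

-- ===== CLAIM (what is proved, stated in full; the proofs are below) =====
def Claim_equal_check_nums : Prop := ∀ (t : List (List Int)), Dom_check_nums t → Spec_check_nums t (check_nums t)

-- ===== LEMMAS AND PROOFS =====

theorem pvRemove?_perm (nums r : List Int) (j : Int)
    (h : PySem.List.remove? nums j = some r) : nums.Perm (j :: r) := by
  have hmem : j ∈ nums := by
    by_contra hj
    rw [(PySem.List.remove?_eq_none_iff nums j).mpr hj] at h
    simp at h
  rw [PySem.List.remove?_eq_some_erase nums j hmem] at h
  injection h with h
  exact h ▸ List.perm_cons_erase hmem

theorem pvRemoveAll_perm (js : List Int) : ∀ (nums r : List Int),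
    pvRemoveAll nums js = some r → nums.Perm (js ++ r) := by
  induction js with
  | nil =>
    intro nums r h
    simp only [pvRemoveAll] at h
    injection h with h
    simp [h]
  | cons j js ih =>
    intro nums r h
    simp only [pvRemoveAll] at h
    cases hrem : PySem.List.remove? nums j with
    | none => simp [hrem] at h
    | some r' =>
      rw [hrem] at h
      exact (pvRemove?_perm nums r' j hrem).trans ((ih r' r h).cons j)

theorem pvRemoveAll_of_perm (js : List Int) : ∀ (nums : List Int),
    nums.Perm js → pvRemoveAll nums js = some [] := by
  induction js with
  | nil => intro nums h; rw [List.perm_nil.mp h]; rfl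
  | cons j js ih =>
    intro nums h
    have hmem : j ∈ nums := h.mem_iff.mpr (List.mem_cons_self)
    have herase : (nums.erase j).Perm js :=
      ((List.perm_cons_erase hmem).symm.trans h).cons_inv
    simp only [pvRemoveAll, PySem.List.remove?_eq_some_erase nums j hmem]
    exact ih _ herase

theorem pvLoopA_eq_removeAll (t : List (List Int)) : ∀ (nums : List Int),
    pvLoopA nums t = pvRemoveAll nums (t.flatMap (fun i => i)) := by
  induction t with
  | nil => intro nums; rfl
  | cons i t ih =>
    intro nums
    simp only [pvLoopA, List.flatMap_cons]
    have happ : ∀ (a : List Int) (b : List Int) (ns : List Int),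
        pvRemoveAll ns (a ++ b) =
          (pvRemoveAll ns a).bind (fun r => pvRemoveAll r b) := by
      intro a
      induction a with
      | nil => intro b ns; rfl
      | cons x xs iha =>
        intro b ns
        simp only [List.cons_append, pvRemoveAll]
        cases PySem.List.remove? ns x with
        | none => rfl
        | some r => exact iha b r
    rw [happ]
    cases pvRemoveAll nums i with
    | none => rfl
    | some r => exact ih r

-- ===== VERDICT (by name: the statement is the Claim_ definition above) =====
theorem check_nums_spec : Claim_equal_check_nums := by
  intro t _
  unfold Spec_check_nums check_nums check_nums_alt
  set flat := t.flatMap (fun i => i) with hflat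
  set R := PySem.List.pyRange 1 10 1 with hR
  rw [pvLoopA_eq_removeAll]
  have hiff : (PySem.List.sorted flat (fun x => x) false = R) ↔ flat.Perm R := by
    constructor
    · intro h
      exact h ▸ (PySem.List.sorted_perm flat (fun x => x) false).symm
    · intro h
      exact PySem.List.sorted_eq_of_perm_of_pairwise_lt flat R (fun x => x)
        h.symm (PySem.List.pairwise_lt_pyRange_one 1 10)
  cases hrem : pvRemoveAll R flat with
  | none =>
    have hnp : ¬ flat.Perm R := by
      intro hp
      rw [pvRemoveAll_of_perm flat R hp.symm] at hrem
      simp at hrem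
    simp [hiff, hnp]
  | some r =>
    cases r with
    | nil =>
      have hp : flat.Perm R := by
        simpa using (pvRemoveAll_perm flat R [] hrem).symm
      simp [hiff, hp]
    | cons x xs =>
      have hnp : ¬ flat.Perm R := by
        intro hp
        rw [pvRemoveAll_of_perm flat R hp.symm] at hrem
        injection hrem with h
        simp at h
      simp [hiff, hnp]
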